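-- pv_equiv track=rewrite | github.com/JakubecSamuel/STUFEI-1stYear | 1semester (Python)/cvicenie9/3.py | sucet
-- ===== SOURCE A (Python) =====
-- def sucet(listt):
--     b = 1
--     result = 0
--     for i in listt:
--         if b%2 == 0:
--             result += i
--         b += 1
--     return result
-- ===== SOURCE B (Python) =====
-- def sucet(listt):
--     return sum(listt[1::2])
-- ===== Notes on version B (the rewrite author's own statement) =====
-- stated objective: simpler
-- what changed: Replaces the counter-and-parity accumulator loop with a single expression summing the stride-2 slice listt[1::2]; no per-element parity state is maintained.
import Mathlib
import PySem

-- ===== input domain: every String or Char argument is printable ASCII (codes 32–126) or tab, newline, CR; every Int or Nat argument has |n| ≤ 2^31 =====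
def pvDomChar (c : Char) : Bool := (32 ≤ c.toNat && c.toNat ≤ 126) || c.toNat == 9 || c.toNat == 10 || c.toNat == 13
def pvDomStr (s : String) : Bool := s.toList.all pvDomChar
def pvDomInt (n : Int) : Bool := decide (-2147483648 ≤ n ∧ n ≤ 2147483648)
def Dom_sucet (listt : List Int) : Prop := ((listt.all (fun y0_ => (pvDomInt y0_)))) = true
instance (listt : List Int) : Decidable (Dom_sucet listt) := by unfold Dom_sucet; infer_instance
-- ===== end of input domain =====

-- B replaces A's counter-and-parity loop with summing the stride-2 slice listt[1::2] (simpler).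

-- ===== PORT A =====
-- b = 1; result = 0; for i in listt: if b%2 == 0: result += i; b += 1; return result
def sucet (listt : List Int) : Int :=
  (listt.foldl (fun (st : Int × Int) i =>
      (st.1 + 1, if st.1 % 2 = 0 then st.2 + i else st.2)) (1, 0)).2

-- ===== PORT B =====
-- return sum(listt[1::2])
def sucet_alt (listt : List Int) : Int :=
  ((PySem.List.slice? listt (some 1) none 2).getD []).sum

-- ===== PRECONDITION & SPEC =====
def Spec_sucet (listt : List Int) (out : Int) : Prop := out = sucet_alt listt
instance (listt : List Int) (out : Int) : Decidable (Spec_sucet listt out) := by unfold Spec_sucet; infer_instance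

-- ===== CLAIM (what is proved, stated in full; the proofs are below) =====
def Claim_equal_sucet : Prop := ∀ (listt : List Int), Dom_sucet listt → Spec_sucet listt (sucet listt)

-- ===== LEMMAS AND PROOFS =====

-- proof helper: the elements Python's listt[1::2] keeps (take=false skips the head)
def pvPick (take : Bool) : List Int → List Int
  | [] => []
  | x :: t => if take then x :: pvPick (!take) t else pvPick (!take) t

-- A's loop: result after the fold is r plus the sum of the elements taken at even counter values
theorem pvFoldA (xs : List Int) : ∀ (b r : Int),
    (xs.foldl (fun (st : Int × Int) i =>
        (st.1 + 1, if st.1 % 2 = 0 then st.2 + i else st.2)) (b, r)).2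
      = r + (pvPick (b % 2 = 0) xs).sum := by
  induction xs with
  | nil => intro b r; simp [pvPick]
  | cons x t ih =>
    intro b r
    simp only [List.foldl_cons]
    rw [ih]
    by_cases h : b % 2 = 0
    · have h1 : ¬ (b + 1) % 2 = 0 := by omega
      simp [pvPick, h, h1]
      ring
    · have h1 : (b + 1) % 2 = 0 := by omega
      simp [pvPick, h, h1]

-- the slice?'s filterMap, in Nat-index form, picks exactly the odd-position elements
theorem pvFM (xs : List Int) :
    List.filterMap (fun k : Nat => xs[1 + 2 * k]?) (List.range (xs.length / 2))
      = pvPick false xs := by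
  match xs with
  | [] => simp [pvPick]
  | [x] => simp [pvPick]
  | x :: y :: r =>
    have ih := pvFM r
    have hlen : (x :: y :: r).length / 2 = r.length / 2 + 1 := by
      simp [List.length_cons]; omega
    rw [hlen, List.range_succ_eq_map, List.filterMap_cons, List.filterMap_map]
    simp only [Nat.mul_zero, Nat.add_zero, List.getElem?_cons_succ, List.getElem?_cons_zero]
    have : (fun k : Nat => (x :: y :: r)[1 + 2 * (k + 1)]?) ∘ id
        = fun k : Nat => r[1 + 2 * k]? := by
      funext k
      have h3 : 1 + 2 * (k + 1) = (1 + 2 * k) + 1 + 1 := by omega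
      simp [h3]
    simp only [Function.comp_def]
    have hcong : List.filterMap (fun k : Nat => (x :: y :: r)[1 + 2 * (Nat.succ k)]?)
        (List.range (r.length / 2)) = List.filterMap (fun k : Nat => r[1 + 2 * k]?)
        (List.range (r.length / 2)) := by
      apply List.filterMap_congr
      intro k _
      have h3 : 1 + 2 * Nat.succ k = (1 + 2 * k) + 1 + 1 := by omega
      simp [h3]
    rw [hcong, ih]
    simp [pvPick]
termination_by xs.length

-- B's slice?[1::2] is exactly pvPick false
theorem pvSliceB (xs : List Int) :
    (PySem.List.slice? xs (some 1) none 2).getD [] = pvPick false xs := by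
  rw [show (2 : Int) = ((2 : Nat) : Int) from rfl]
  simp only [PySem.List.slice?, PySem.List.sliceIndices]
  norm_num
  rcases xs with _ | ⟨x, t⟩
  · simp [pvPick]
  · have hmin : min (1 : Int) ((x :: t).length : Int) = 1 := by
      simp [List.length_cons]
    rw [hmin]
    have hcount : (if 1 < (x :: t).length
        then ((((x :: t).length : Int) - 1 + 2 - 1) / 2).toNat else 0)
        = (x :: t).length / 2 := by
      by_cases h : 1 < (x :: t).length
      · simp only [h, if_true]
        omega
      · have h0 : (x :: t).length = 1 := by
          simp only [List.length_cons] at h ⊢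
          omega
        simp [h0]
    rw [hcount]
    rw [← pvFM (x :: t)]
    apply List.filterMap_congr
    intro k _
    have h3 : ((1 : Int) + 2 * (k : Int)).toNat = 1 + 2 * k := by omega
    rw [h3]

-- ===== VERDICT (by name: the statement is the Claim_ definition above) =====
theorem sucet_spec : Claim_equal_sucet := by
  intro listt _
  unfold Spec_sucet sucet sucet_alt
  rw [pvSliceB, pvFoldA]
  norm_num
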